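-- pv_equiv track=rewrite | github.com/NicoCathare/MotCroise | backend/server.py | _find_letter_groups_in_row
-- ===== SOURCE A (Python) =====
-- from typing import List, Optional, Dict, Any
--
-- def _find_letter_groups_in_row(grid: List[List[str]], row: int, cols: int) -> List[Dict]:
--     """Find groups of consecutive letters (no empty, no #) in a row."""
--     groups = []
--     start = None
--     for c in range(cols):
--         cell = grid[row][c]
--         if cell != "" and cell != "#":
--             if start is None:
--                 start = c
--         else:
--             if start is not None:
--                 length = c - start
--                 if length >= 3:
--                     groups.append({"start": start, "length": length})
--                 start = None
--     if start is not None: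
--         length = cols - start
--         if length >= 3:
--             groups.append({"start": start, "length": length})
--     return groups
-- ===== SOURCE B (Python) =====
-- from typing import List, Dict
--
-- def _find_letter_groups_in_row(grid: List[List[str]], row: int, cols: int) -> List[Dict]:
--     """Build a boolean run-representation of the row, then scan it span by span."""
--     flags = [grid[row][c] != "" and grid[row][c] != "#" for c in range(cols)]
--     groups = []
--     i = 0
--     n = len(flags)
--     while i < n:
--         if not flags[i]:
--             i += 1
--             continue
--         j = i
--         while j < n and flags[j]:
--             j += 1
--         if j - i >= 3:
--             groups.append({"start": i, "length": j - i})
--         i = j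
--     return groups
-- ===== Notes on version B (the rewrite author's own statement) =====
-- stated objective: alternative
-- what changed: Replaces A's incremental start/flush state machine (with a trailing flush after the loop) by build-representation-then-scan: first materialise the row as a boolean flag list, then walk it jumping span by span (inner run scan), so no pending-start state or end-of-loop flush exists.
import Mathlib
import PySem

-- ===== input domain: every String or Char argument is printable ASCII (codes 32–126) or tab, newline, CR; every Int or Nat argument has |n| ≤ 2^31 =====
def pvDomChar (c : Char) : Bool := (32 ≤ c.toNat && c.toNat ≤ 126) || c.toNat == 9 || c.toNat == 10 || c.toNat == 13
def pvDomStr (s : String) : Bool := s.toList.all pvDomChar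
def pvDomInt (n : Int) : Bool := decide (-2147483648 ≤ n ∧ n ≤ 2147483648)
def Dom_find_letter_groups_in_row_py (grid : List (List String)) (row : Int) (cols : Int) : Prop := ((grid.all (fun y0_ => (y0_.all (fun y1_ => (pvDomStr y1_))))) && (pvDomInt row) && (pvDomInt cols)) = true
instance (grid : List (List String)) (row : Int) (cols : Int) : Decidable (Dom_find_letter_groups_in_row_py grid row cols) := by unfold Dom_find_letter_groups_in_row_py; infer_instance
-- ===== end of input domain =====

-- B replaces A's incremental start/flush state machine by build-a-flag-list-then-span-scan; objective: alternative (same cost).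

-- ===== PORT A =====
-- Literal port of A's loop: state (groups, start); cell accesses are exact under Pre_ (getD defaults are never read there).
def find_letter_groups_in_row_py (grid : List (List String)) (row : Int) (cols : Int) : List (List (String × Int)) :=
  let rowList := (PySem.List.pyGet? grid row).getD []
  let fin := (PySem.List.pyRange 0 cols 1).foldl (fun (st : List (List (String × Int)) × Option Int) (c : Int) =>
      let cell := (PySem.List.pyGet? rowList c).getD ""
      if cell != "" && cell != "#" then
        match st.2 with
        | none => (st.1, some c)
        | some _ => st
      else
        match st.2 with
        | some s => (if c - s ≥ 3 then st.1 ++ [[("start", s), ("length", c - s)]] else st.1, none)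
        | none => st) ([], none)
  match fin.2 with
  | some s => if cols - s ≥ 3 then fin.1 ++ [[("start", s), ("length", cols - s)]] else fin.1
  | none => fin.1

-- ===== PORT B =====
-- B-side helper: scan the flag list span by span (the two while loops of Source B);
-- takeWhile/dropWhile are the inner 'while j < n and flags[j]: j += 1' run scan.
def pvSpanRuns : List Bool → Int → List (List (String × Int))
  | [], _ => []
  | false :: rest, i => pvSpanRuns rest (i + 1)
  | true :: rest, i =>
    let k : Int := 1 + (rest.takeWhile id).length
    if k ≥ 3 then [("start", i), ("length", k)] :: pvSpanRuns (rest.dropWhile id) (i + k)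
    else pvSpanRuns (rest.dropWhile id) (i + k)
termination_by l _ => l.length
decreasing_by
  · simp
  · have := List.length_dropWhile_le (p := id) (l := rest)
    simp; omega
  · have := List.length_dropWhile_le (p := id) (l := rest)
    simp; omega

def find_letter_groups_in_row_py_alt (grid : List (List String)) (row : Int) (cols : Int) : List (List (String × Int)) :=
  let rowList := (PySem.List.pyGet? grid row).getD []
  let flags := (PySem.List.pyRange 0 cols 1).map (fun c =>
      let cell := (PySem.List.pyGet? rowList c).getD ""
      cell != "" && cell != "#")
  pvSpanRuns flags 0

-- ===== PRECONDITION & SPEC =====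
-- Pre_ excludes exactly the inputs where Python A raises IndexError: cols > 0 with row out of
-- (wraparound) range, or the selected row shorter than cols.
def Pre_find_letter_groups_in_row_py (grid : List (List String)) (row : Int) (cols : Int) : Prop :=
  cols ≤ 0 ∨ (PySem.Raise.InRange grid.length row ∧ cols ≤ (((PySem.List.pyGet? grid row).getD []).length : Int))
instance (grid : List (List String)) (row : Int) (cols : Int) : Decidable (Pre_find_letter_groups_in_row_py grid row cols) := by unfold Pre_find_letter_groups_in_row_py; infer_instance
def pvWitness_find_letter_groups_in_row_py : List (List String) × Int × Int := ([["A", "B", "C", "", "x"]], 0, 5)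

def Spec_find_letter_groups_in_row_py (grid : List (List String)) (row : Int) (cols : Int) (out : List (List (String × Int))) : Prop := out = find_letter_groups_in_row_py_alt grid row cols
instance (grid : List (List String)) (row : Int) (cols : Int) (out : List (List (String × Int))) : Decidable (Spec_find_letter_groups_in_row_py grid row cols out) := by unfold Spec_find_letter_groups_in_row_py; infer_instance

-- ===== CLAIM (what is proved, stated in full; the proofs are below) =====
def Claim_equal_find_letter_groups_in_row_py : Prop := ∀ (grid : List (List String)) (row : Int) (cols : Int), Dom_find_letter_groups_in_row_py grid row cols → Pre_find_letter_groups_in_row_py grid row cols → Spec_find_letter_groups_in_row_py grid row cols (find_letter_groups_in_row_py grid row cols)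

-- ===== LEMMAS AND PROOFS =====

lemma pvSpanRuns_nil (i : Int) : pvSpanRuns [] i = [] := by rw [pvSpanRuns]

lemma pvSpanRuns_false (rest : List Bool) (i : Int) :
    pvSpanRuns (false :: rest) i = pvSpanRuns rest (i + 1) := by rw [pvSpanRuns]

lemma pvSpanRuns_true (rest : List Bool) (i : Int) :
    pvSpanRuns (true :: rest) i =
      (if (1 + ((rest.takeWhile id).length : Int)) ≥ 3 then
        [("start", i), ("length", 1 + ((rest.takeWhile id).length : Int))] ::
          pvSpanRuns (rest.dropWhile id) (i + (1 + ((rest.takeWhile id).length : Int)))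
      else pvSpanRuns (rest.dropWhile id) (i + (1 + ((rest.takeWhile id).length : Int)))) := by
  rw [pvSpanRuns]

-- the A-side loop body, abstracted over the per-cell flag
def pvStep (f : Int → Bool) (st : List (List (String × Int)) × Option Int) (c : Int) :
    List (List (String × Int)) × Option Int :=
  if f c then
    match st.2 with
    | none => (st.1, some c)
    | some _ => st
  else
    match st.2 with
    | some s => (if c - s ≥ 3 then st.1 ++ [[("start", s), ("length", c - s)]] else st.1, none)
    | none => st

def pvFinish (e : Int) (st : List (List (String × Int)) × Option Int) : List (List (String × Int)) :=
  match st.2 with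
  | some s => if e - s ≥ 3 then st.1 ++ [[("start", s), ("length", e - s)]] else st.1
  | none => st.1

-- consecutive Ints i0, i0+1, …, i0+n-1
def pvInts : Nat → Int → List Int
  | 0, _ => []
  | n + 1, i0 => i0 :: pvInts n (i0 + 1)

lemma pvInts_eq_pyRange : ∀ (n : Nat) (i0 : Int), pvInts n i0 = PySem.List.pyRange i0 (i0 + n) 1 := by
  intro n
  induction n with
  | zero => intro i0; simp [pvInts, PySem.List.pyRange_one_eq_nil]
  | succ n ih =>
    intro i0
    rw [PySem.List.pyRange_one_cons (by push_cast; omega)]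
    simp [pvInts, ih (i0 + 1)]
    congr 1
    ring

-- the core equivalence: A's fold+flush machine = B's span scan, on any flag function
lemma pvMain (f : Int → Bool) : ∀ (n : Nat) (i0 : Int) (acc : List (List (String × Int))),
    (pvFinish (i0 + n) ((pvInts n i0).foldl (pvStep f) (acc, none))
      = acc ++ pvSpanRuns ((pvInts n i0).map f) i0)
    ∧ (∀ s : Int,
        pvFinish (i0 + n) ((pvInts n i0).foldl (pvStep f) (acc, some s))
          = (if i0 + ((((pvInts n i0).map f).takeWhile id).length : Int) - s ≥ 3 then
               acc ++ [[("start", s), ("length", i0 + ((((pvInts n i0).map f).takeWhile id).length : Int) - s)]]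
             else acc)
            ++ pvSpanRuns (((pvInts n i0).map f).dropWhile id)
                 (i0 + ((((pvInts n i0).map f).takeWhile id).length : Int))) := by
  intro n
  induction n with
  | zero =>
    intro i0 acc
    constructor
    · simp [pvInts, pvFinish, pvSpanRuns_nil]
    · intro s
      simp [pvInts, pvFinish, pvSpanRuns_nil]
  | succ n ih =>
    intro i0 acc
    have hcast : i0 + ((n : Int) + 1) = (i0 + 1) + n := by ring
    constructor
    · -- start = none
      cases hb : f i0 with
      | false =>
        simp only [pvInts, List.foldl_cons, List.map_cons, pvStep, hb, Bool.false_eq_true, if_false]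
        rw [pvSpanRuns_false]
        push_cast
        rw [hcast]
        exact (ih (i0 + 1) acc).1
      | true =>
        simp only [pvInts, List.foldl_cons, List.map_cons, pvStep, hb, if_true]
        rw [pvSpanRuns_true]
        push_cast
        rw [hcast]
        have h2 := (ih (i0 + 1) acc).2 i0
        rw [h2]
        have harith : (i0 + 1) + ((((pvInts n (i0 + 1)).map f).takeWhile id).length : Int) - i0
            = 1 + ((((pvInts n (i0 + 1)).map f).takeWhile id).length : Int) := by ring
        have harith2 : (i0 + 1) + ((((pvInts n (i0 + 1)).map f).takeWhile id).length : Int)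
            = i0 + (1 + ((((pvInts n (i0 + 1)).map f).takeWhile id).length : Int)) := by ring
        rw [harith, harith2]
        split_ifs with h
        · simp
        · simp
    · -- start = some s
      intro s
      cases hb : f i0 with
      | false =>
        have ht : List.takeWhile id (false :: (pvInts n (i0 + 1)).map f) = [] := by simp
        have hd : List.dropWhile id (false :: (pvInts n (i0 + 1)).map f) = false :: (pvInts n (i0 + 1)).map f := by simp
        simp only [pvInts, List.foldl_cons, List.map_cons, pvStep, hb, Bool.false_eq_true, if_false]
        have h1 := (ih (i0 + 1) (if i0 - s ≥ 3 then acc ++ [[("start", s), ("length", i0 - s)]] else acc)).1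
        push_cast
        rw [hcast, ht, hd]
        simp only [List.length_nil, Nat.cast_zero, add_zero]
        rw [pvSpanRuns_false, h1]
      | true =>
        have ht : List.takeWhile id (true :: (pvInts n (i0 + 1)).map f) = true :: List.takeWhile id ((pvInts n (i0 + 1)).map f) := by simp
        have hd : List.dropWhile id (true :: (pvInts n (i0 + 1)).map f) = List.dropWhile id ((pvInts n (i0 + 1)).map f) := by simp
        simp only [pvInts, List.foldl_cons, List.map_cons, pvStep, hb, if_true]
        have h2 := (ih (i0 + 1) acc).2 s
        push_cast
        rw [hcast, h2, ht, hd]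
        simp only [List.length_cons]
        push_cast
        have e1 : (i0 + 1) + ((((pvInts n (i0 + 1)).map f).takeWhile id).length : Int) - s
            = i0 + (((((pvInts n (i0 + 1)).map f).takeWhile id).length : Int) + 1) - s := by ring
        have e2 : (i0 + 1) + ((((pvInts n (i0 + 1)).map f).takeWhile id).length : Int)
            = i0 + (((((pvInts n (i0 + 1)).map f).takeWhile id).length : Int) + 1) := by ring
        rw [e1, e2]

-- ===== VERDICT (by name: the statement is the Claim_ definition above) =====
theorem find_letter_groups_in_row_py_spec : Claim_equal_find_letter_groups_in_row_py := by
  intro grid row cols _ _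
  unfold Spec_find_letter_groups_in_row_py
  unfold find_letter_groups_in_row_py find_letter_groups_in_row_py_alt
  set rowList := (PySem.List.pyGet? grid row).getD [] with hrow
  set f : Int → Bool := fun c => ((PySem.List.pyGet? rowList c).getD "" != "" && (PySem.List.pyGet? rowList c).getD "" != "#") with hf
  by_cases hc : cols ≤ 0
  · rw [PySem.List.pyRange_one_eq_nil (by omega)]
    simp [pvSpanRuns_nil]
  · have hr : PySem.List.pyRange 0 cols 1 = pvInts cols.toNat 0 := by
      rw [pvInts_eq_pyRange]
      congr 1
      omega
    rw [hr]
    have hmain := (pvMain f cols.toNat 0 []).1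
    have hcols : (0 : Int) + (cols.toNat : Int) = cols := by omega
    rw [hcols] at hmain
    show pvFinish cols ((pvInts cols.toNat 0).foldl (pvStep f) ([], none))
        = pvSpanRuns ((pvInts cols.toNat 0).map f) 0
    rw [hmain]
    simp
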